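-- pv_equiv track=rewrite | github.com/sharedstudios/ZoomCloudRecordingDownloader | database.py | filterTranscript
-- ===== SOURCE A (Python) =====
-- def filterTranscript(transcriptContent):
--   transcriptContent = transcriptContent[1:]  # delete the first line
--   filtered = []
--   i = 1
--   for line in transcriptContent:
--     if i == 4:
--       filtered.append(line)
--       i = 0
--     i += 1
--
--   for i in range(len(filtered)):
--     if len(filtered[i].split(': ')) > 1:
--       filtered[i] = filtered[i].split(': ')[1]
--
--   return filtered
-- ===== SOURCE B (Python) =====
-- def filterTranscript(transcriptContent):
--     # Walk the selected positions back-to-front (last kept index is 4*((n-1)//4)),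
--     # strip the speaker prefix with partition, then reverse once at the end.
--     out = []
--     start = 4 * ((len(transcriptContent) - 1) // 4)
--     for j in range(start, 3, -4):
--         line = transcriptContent[j]
--         head, sep, tail = line.partition(': ')
--         out.append(tail.partition(': ')[0] if sep else line)
--     out.reverse()
--     return out
-- ===== Notes on version B (the rewrite author's own statement) =====
-- stated objective: alternative
-- what changed: B walks the kept positions back-to-front from the closed-form last index 4*((n-1)//4) with a stride-(-4) range, strips the prefix with str.partition (two partitions instead of splitting the whole line), builds the output reversed and reverses once at the end, replacing A's reset-counter forward loop plus second in-place split pass.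
import Mathlib
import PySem

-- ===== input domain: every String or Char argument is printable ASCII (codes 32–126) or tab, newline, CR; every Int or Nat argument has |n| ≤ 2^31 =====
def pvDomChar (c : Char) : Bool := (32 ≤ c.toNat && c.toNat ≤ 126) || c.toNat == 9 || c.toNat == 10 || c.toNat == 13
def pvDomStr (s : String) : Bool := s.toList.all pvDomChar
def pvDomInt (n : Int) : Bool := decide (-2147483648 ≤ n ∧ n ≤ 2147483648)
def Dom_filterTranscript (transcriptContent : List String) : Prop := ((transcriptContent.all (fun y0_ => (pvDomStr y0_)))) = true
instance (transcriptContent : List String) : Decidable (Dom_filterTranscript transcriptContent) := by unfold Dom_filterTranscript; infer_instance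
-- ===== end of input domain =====

-- B walks the kept positions back-to-front from the closed-form last index 4*((n-1)//4), strips
-- the prefix with str.partition instead of split, and reverses once at the end (alternative decomposition; same O(n) cost).

-- ===== PORT A =====
def filterTranscript (transcriptContent : List String) : List String :=
  let transcriptContent := PySem.List.slice transcriptContent (some 1) none  -- delete the first line
  let st := transcriptContent.foldl
    (fun (st : List String × Int) line =>
      let filtered := st.1
      let i := st.2
      let (filtered, i) := if i = 4 then (filtered ++ [line], (0 : Int)) else (filtered, i)
      (filtered, i + 1))
    ([], 1)
  let filtered := st.1
  (PySem.List.pyRange 0 (filtered.length : Int) 1).foldl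
    (fun filtered i =>
      if ((PySem.Str.split? (PySem.List.pyGetD filtered i "") ": ").getD []).length > 1 then
        filtered.set i.toNat (((PySem.Str.split? (PySem.List.pyGetD filtered i "") ": ").getD [])[1]!)
      else filtered)
    filtered

-- ===== PORT B =====
-- hand port of Python str.partition(sep) for a fixed NONEMPTY sep, on List Char:
-- scan left to right for the first occurrence of sep; none = not found (Python returns (s, '', '')).
-- Exact for nonempty sep; Source B only partitions by ': '.
def pvPartChars (sep : List Char) : List Char → Option (List Char × List Char)
  | [] => none
  | c :: rest =>
    if sep.isPrefixOf (c :: rest) then some ([], (c :: rest).drop sep.length)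
    else
      match pvPartChars sep rest with
      | none => none
      | some (h, t) => some (c :: h, t)

-- line.partition(': ') as the Python triple (head, sep, tail)
def pvPartition (s : String) : String × String × String :=
  match pvPartChars ": ".toList s.toList with
  | none => (s, "", "")
  | some (h, t) => (String.ofList h, ": ", String.ofList t)

def filterTranscript_alt (transcriptContent : List String) : List String :=
  let start : Int := 4 * (PySem.Int.floordiv ((transcriptContent.length : Int) - 1) 4)
  let out := (PySem.List.pyRange start 3 (-4)).foldl
    (fun out j =>
      let line := PySem.List.pyGetD transcriptContent j ""
      let p := pvPartition line
      out ++ [if p.2.1 ≠ "" then (pvPartition p.2.2).1 else line])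
    []
  out.reverse

-- ===== PRECONDITION & SPEC =====
def Spec_filterTranscript (transcriptContent : List String) (out : List String) : Prop := out = filterTranscript_alt transcriptContent
instance (transcriptContent : List String) (out : List String) : Decidable (Spec_filterTranscript transcriptContent out) := by unfold Spec_filterTranscript; infer_instance

-- ===== CLAIM (what is proved, stated in full; the proofs are below) =====
def Claim_equal_filterTranscript : Prop := ∀ (transcriptContent : List String), Dom_filterTranscript transcriptContent → Spec_filterTranscript transcriptContent (filterTranscript transcriptContent)

-- ===== LEMMAS AND PROOFS =====

-- every 4th element: pvSel n xs takes an element after skipping n, then every 4th after that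
def pvSel : Nat → List String → List String
  | _, [] => []
  | 0, x :: xs => x :: pvSel 3 xs
  | n+1, _ :: xs => pvSel n xs

-- A's counter loop selects pvSel (4-i) of the remaining lines
lemma pv_loopA (xs : List String) : ∀ (acc : List String) (i : Int), 1 ≤ i → i ≤ 4 →
    (xs.foldl
      (fun (st : List String × Int) line =>
        let filtered := st.1
        let i := st.2
        let (filtered, i) := if i = 4 then (filtered ++ [line], (0 : Int)) else (filtered, i)
        (filtered, i + 1))
      (acc, i)).1 = acc ++ pvSel (4 - i).toNat xs := by
  induction xs with
  | nil => intro acc i h1 h4; simp [pvSel]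
  | cons x xs ih =>
    intro acc i h1 h4
    by_cases h : i = 4
    · subst h
      have hrec := ih (acc ++ [x]) 1 (by omega) (by omega)
      simp only [show ((4:Int) - 1).toNat = 3 by decide] at hrec
      have h0 : ((4:Int) - 4).toNat = 0 := by decide
      rw [h0]
      simp [pvSel, hrec]
    · have hrec := ih acc (i + 1) (by omega) (by omega)
      have h0 : (4 - i).toNat = (4 - (i + 1)).toNat + 1 := by omega
      rw [h0]
      simp [pvSel, h, hrec]

-- what A's second pass does to one line
def pvCleanA (line : String) : String :=
  let parts := (PySem.Str.split? line ": ").getD []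
  if parts.length > 1 then parts[1]! else line

-- A's in-place second pass is a map of pvCleanA
lemma pv_loopB : ∀ (xs done : List String),
    (PySem.List.pyRange (done.length : Int) ((done.length : Int) + (xs.length : Int)) 1).foldl
      (fun filtered i =>
        if ((PySem.Str.split? (PySem.List.pyGetD filtered i "") ": ").getD []).length > 1 then
          filtered.set i.toNat (((PySem.Str.split? (PySem.List.pyGetD filtered i "") ": ").getD [])[1]!)
        else filtered)
      (done ++ xs) = done ++ xs.map pvCleanA := by
  intro xs
  induction xs with
  | nil => intro done; simp [PySem.List.pyRange_one_eq_nil]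
  | cons x xs ih =>
    intro done
    have hlt : (done.length : Int) < (done.length : Int) + ((x :: xs).length : Int) := by
      simp
    rw [PySem.List.pyRange_one_cons hlt]
    simp only [List.foldl_cons]
    have hget : PySem.List.pyGetD (done ++ x :: xs) (done.length : Int) "" = x := by
      simp [PySem.List.pyGetD_natCast, List.getD_eq_getElem?_getD]
    have hstep :
        (if ((PySem.Str.split? (PySem.List.pyGetD (done ++ x :: xs) (done.length : Int) "") ": ").getD []).length > 1 then
          (done ++ x :: xs).set (done.length : Int).toNat
            (((PySem.Str.split? (PySem.List.pyGetD (done ++ x :: xs) (done.length : Int) "") ": ").getD [])[1]!)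
        else (done ++ x :: xs)) = (done ++ [pvCleanA x]) ++ xs := by
      rw [hget]
      by_cases h : ((PySem.Str.split? x ": ").getD []).length > 1
      · rw [if_pos h]
        simp [pvCleanA, if_pos h]
      · rw [if_neg h]
        simp [pvCleanA, if_neg h]
    rw [hstep]
    have hb : (done.length : Int) + ((x :: xs).length : Int)
        = (((done ++ [pvCleanA x]).length : Int)) + (xs.length : Int) := by
      simp; omega
    have ha : (done.length : Int) + 1 = (((done ++ [pvCleanA x]).length : Int)) := by
      simp
    rw [hb, ha, ih (done ++ [pvCleanA x])]
    simp [pvCleanA]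

-- the separator used throughout
def pvSep : List Char := ": ".toList

-- a found partition strictly shrinks the tail
lemma pvPart_shrink : ∀ (l h t : List Char), pvPartChars pvSep l = some (h, t) → t.length < l.length := by
  intro l
  induction l with
  | nil => intro h t hpt; simp [pvPartChars] at hpt
  | cons c rest ih =>
    intro h t hpt
    rw [pvPartChars] at hpt
    have hs2 : pvSep.length = 2 := by decide
    by_cases hp : pvSep.isPrefixOf (c :: rest) = true
    · rw [if_pos hp] at hpt
      cases hpt
      simp [hs2]
    · rw [if_neg hp] at hpt
      cases hr : pvPartChars pvSep rest with
      | none => rw [hr] at hpt; cases hpt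
      | some p =>
        rw [hr] at hpt
        obtain ⟨h', t'⟩ := p
        have hlt := ih h' t' hr
        cases hpt
        simp only [List.length_cons]
        omega

-- recursive specification of s.split(': ')
def pvSplitSpec (l : List Char) : List (List Char) :=
  match hp : pvPartChars pvSep l with
  | none => [l]
  | some (h, t) => h :: pvSplitSpec t
termination_by l.length
decreasing_by exact pvPart_shrink _ _ _ hp

lemma pvSplitSpec_none {l : List Char} (h : pvPartChars pvSep l = none) : pvSplitSpec l = [l] := by
  unfold pvSplitSpec
  split
  · rfl
  · rename_i hd t heq
    rw [h] at heq
    cases heq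

lemma pvSplitSpec_some {l hd t : List Char} (h : pvPartChars pvSep l = some (hd, t)) :
    pvSplitSpec l = hd :: pvSplitSpec t := by
  conv_lhs => rw [pvSplitSpec.eq_def]
  split
  · rename_i heq
    rw [h] at heq
    cases heq
  · rename_i hd' t' heq
    rw [h] at heq
    cases heq
    rfl

lemma pvSplitSpec_ne_nil (l : List Char) : pvSplitSpec l ≠ [] := by
  cases hp : pvPartChars pvSep l with
  | none => rw [pvSplitSpec_none hp]; simp
  | some p =>
    obtain ⟨hd, t⟩ := p
    rw [pvSplitSpec_some hp]
    simp

-- splitOn's worker, characterised by pvSplitSpec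
lemma pv_go (fuel : Nat) : ∀ (l cur : List Char) (acc : List (List Char)), l.length < fuel →
    PySem.Chars.splitOn.go pvSep fuel l cur acc
      = acc.reverse ++ (pvSplitSpec l).modifyHead (fun p => cur.reverse ++ p) := by
  induction fuel with
  | zero => intro l cur acc h; omega
  | succ fuel ih =>
    intro l cur acc h
    cases l with
    | nil =>
      rw [PySem.Chars.splitOn.go]
      · rw [pvSplitSpec_none (by simp [pvPartChars])]
        simp
      · omega
    | cons c rest =>
      rw [PySem.Chars.splitOn.go]
      by_cases hp : pvSep.isPrefixOf (c :: rest) = true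
      · rw [if_pos hp]
        have hs2 : pvSep.length = 2 := by decide
        have hlen : ((c :: rest).drop pvSep.length).length < fuel := by
          simp only [List.length_cons] at h
          simp [hs2]
          omega
        rw [ih ((c :: rest).drop pvSep.length) [] (cur.reverse :: acc) hlen]
        rw [pvSplitSpec_some (l := c :: rest) (hd := []) (t := (c :: rest).drop pvSep.length)
          (by simp [pvPartChars, hp])]
        cases hd : pvSplitSpec ((c :: rest).drop pvSep.length) with
        | nil => exact absurd hd (pvSplitSpec_ne_nil _)
        | cons a tl => simp
      · rw [if_neg hp]
        rw [ih rest (c :: cur) acc (by simp at h ⊢; omega)]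
        cases hr : pvPartChars pvSep rest with
        | none =>
          rw [pvSplitSpec_none (l := c :: rest) (by simp [pvPartChars, hp, hr])]
          rw [pvSplitSpec_none hr]
          simp
        | some p =>
          obtain ⟨h', t'⟩ := p
          rw [pvSplitSpec_some (l := c :: rest) (hd := c :: h') (t := t')
            (by simp [pvPartChars, hp, hr])]
          rw [pvSplitSpec_some hr]
          simp

lemma pv_splitOn (l : List Char) : PySem.Chars.splitOn l pvSep = pvSplitSpec l := by
  rw [PySem.Chars.splitOn, pv_go (l.length + 1) l [] [] (by omega)]
  cases hs : pvSplitSpec l with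
  | nil => exact absurd hs (pvSplitSpec_ne_nil l)
  | cons a tl => simp

-- the two per-line cleanups agree
lemma pv_clean (line : String) :
    pvCleanA line
      = (let p := pvPartition line
         if p.2.1 ≠ "" then (pvPartition p.2.2).1 else line) := by
  have hsplit : PySem.Str.split? line ": "
      = some ((pvSplitSpec line.toList).map String.ofList) := by
    rw [PySem.Str.split?, PySem.Chars.split?]
    rw [if_neg (by decide)]
    rw [show ": ".toList = pvSep from rfl, pv_splitOn]
    simp
  unfold pvCleanA pvPartition
  rw [hsplit]
  simp only [Option.getD_some]
  rw [show ": ".toList = pvSep from rfl]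
  cases h1 : pvPartChars pvSep line.toList with
  | none =>
    rw [pvSplitSpec_none h1]
    simp
  | some p =>
    obtain ⟨h, t⟩ := p
    rw [pvSplitSpec_some h1]
    have hts : (String.ofList t).toList = t := by simp
    rw [hts]
    cases h2 : pvPartChars pvSep t with
    | none =>
      rw [pvSplitSpec_none h2]
      simp
    | some q =>
      obtain ⟨h2', t2'⟩ := q
      rw [pvSplitSpec_some h2]
      simp

-- pvSel 3 picks indices 3, 7, 11, …
lemma pvSel3_eq : ∀ (n : Nat) (xs : List String), xs.length ≤ n →
    pvSel 3 xs = (List.range (xs.length / 4)).map (fun i => xs.getD (4*i+3) "") := by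
  intro n
  induction n with
  | zero =>
    intro xs h
    have : xs = [] := by cases xs with | nil => rfl | cons a t => simp at h
    subst this; simp [pvSel]
  | succ n ih =>
    intro xs h
    rcases xs with _ | ⟨a, _ | ⟨b, _ | ⟨c, _ | ⟨d, rest⟩⟩⟩⟩
    · simp [pvSel]
    · simp [pvSel]
    · simp [pvSel]
    · simp [pvSel]
    · have hlen : (a :: b :: c :: d :: rest).length / 4 = rest.length / 4 + 1 := by
        simp; omega
      rw [hlen, List.range_succ_eq_map]
      have hrec := ih rest (by simp at h; omega)
      simp only [pvSel, List.map_cons, List.map_map]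
      rw [hrec]
      congr 1

-- the reversed descending stride-4 range is [4, 8, …, 4k]
lemma pvRangeRev (k : Nat) :
    (PySem.List.pyRange ((4*k : Nat) : Int) 3 (-4)).reverse
      = (List.range k).map (fun i => ((4*(i+1) : Nat) : Int)) := by
  rw [PySem.List.pyRange]
  rw [if_neg (by decide)]
  cases k with
  | zero => simp
  | succ m =>
    have hlt : ¬ (0 : Int) < -4 := by decide
    rw [if_neg hlt]
    have h3 : (3 : Int) < ((4*(m+1) : Nat) : Int) := by push_cast; omega
    rw [if_pos h3]
    have hcount : ((((4*(m+1) : Nat) : Int) - 3 + -(-4) - 1) / -(-4)).toNat = m + 1 := by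
      push_cast; omega
    rw [hcount]
    apply List.ext_getElem
    · simp
    · intro i hi hi'
      rw [List.getElem_reverse]
      simp only [List.getElem_map, List.getElem_range]
      simp only [List.length_reverse, List.length_map, List.length_range] at hi
      simp only [List.length_map, List.length_range]
      push_cast
      omega

lemma pv_main (tc : List String) : filterTranscript tc = filterTranscript_alt tc := by
  cases tc with
  | nil => rfl
  | cons x xs =>
    unfold filterTranscript filterTranscript_alt
    have hslice : PySem.List.slice (x :: xs) (some 1) none = xs := by
      simp [PySem.List.slice_some_none, PySem.List.clampIdx]
    rw [hslice]
    simp only []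
    -- A's side
    have hA := pv_loopA xs [] 1 (by omega) (by omega)
    simp only [show ((4:Int) - 1).toNat = 3 by decide, List.nil_append] at hA
    rw [hA]
    have hB := pv_loopB (pvSel 3 xs) []
    simp only [List.nil_append, List.length_nil, Nat.cast_zero, zero_add] at hB
    rw [hB]
    -- B's side
    have hstart : 4 * (PySem.Int.floordiv (((x :: xs).length : Int) - 1) 4) = ((4 * (xs.length / 4) : Nat) : Int) := by
      have h1 : (((x :: xs).length : Int) - 1) = ((xs.length : Nat) : Int) := by simp
      rw [h1, show (4 : Int) = ((4 : Nat) : Int) from rfl, PySem.Int.floordiv_natCast]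
      push_cast; ring
    rw [hstart]
    rw [PySem.List.foldl_append_singleton_eq_map
      (f := fun j =>
        let line := PySem.List.pyGetD (x :: xs) j ""
        let p := pvPartition line
        if p.2.1 ≠ "" then (pvPartition p.2.2).1 else line)]
    rw [List.nil_append, ← List.map_reverse, pvRangeRev, List.map_map]
    rw [pvSel3_eq xs.length xs le_rfl, List.map_map]
    apply List.map_congr_left
    intro i hi
    simp only [List.mem_range] at hi
    simp only [Function.comp]
    rw [pv_clean]
    have hget : PySem.List.pyGetD (x :: xs) ((4*(i+1) : Nat) : Int) "" = xs.getD (4*i+3) "" := by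
      rw [PySem.List.pyGetD_natCast]
      have : 4*(i+1) = (4*i+3) + 1 := by omega
      rw [this]
      simp [List.getD]
    rw [hget]

-- ===== VERDICT (by name: the statement is the Claim_ definition above) =====
theorem filterTranscript_spec : Claim_equal_filterTranscript := by
  intro tc _
  unfold Spec_filterTranscript
  exact pv_main tc
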